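-- pv_equiv track=rewrite | github.com/Weilory/ConvexHull | RadarSearch_StepPlot.py | find_top_right
-- ===== SOURCE A (Python) =====
-- def find_top_right(dts):
--     tops = [dts[0]]
--     for dt in dts:
--         if dt[1] > tops[0][1]:
--             tops = [dt]
--         elif dt[1] == tops[0][1]:
--             tops.append(dt)
--     top_right = tops[0]
--     for dt in tops:
--         if dt[0] > top_right[0]:
--             top_right = dt
--     return top_right
-- ===== SOURCE B (Python) =====
-- def find_top_right(dts):
--     best = dts[0]
--     for dt in dts:
--         if dt[1] > best[1] or (dt[1] == best[1] and dt[0] > best[0]):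
--             best = dt
--     return best
-- ===== Notes on version B (the rewrite author's own statement) =====
-- stated objective: simpler
-- what changed: Single linear pass keeping one lexicographic (y, then x) best point, instead of first building a list of all max-y points and then scanning that list for the max x.
import Mathlib
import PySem

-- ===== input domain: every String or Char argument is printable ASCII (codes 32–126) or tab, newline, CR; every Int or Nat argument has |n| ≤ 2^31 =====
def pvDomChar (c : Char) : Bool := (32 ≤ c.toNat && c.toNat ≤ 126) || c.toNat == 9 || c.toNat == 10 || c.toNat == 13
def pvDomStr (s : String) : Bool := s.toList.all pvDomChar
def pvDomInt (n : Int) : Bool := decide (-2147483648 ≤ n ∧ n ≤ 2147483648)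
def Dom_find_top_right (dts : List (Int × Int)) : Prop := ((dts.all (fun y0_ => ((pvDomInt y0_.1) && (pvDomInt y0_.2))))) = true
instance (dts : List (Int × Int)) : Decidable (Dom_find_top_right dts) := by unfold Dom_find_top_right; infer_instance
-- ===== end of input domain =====

-- B replaces A's two scans (collect all max-y points, then pick max x among them) by one
-- linear pass keeping a single lexicographic (y, then x) best point; objective: simpler.
-- Both raise IndexError on the empty list (dts[0]); Pre_ excludes exactly that input.

-- ===== PORT A =====
-- one step of A's first loop: update the `tops` list for one point dt
def pvStepA (tops : List (Int × Int)) (dt : Int × Int) : List (Int × Int) :=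
  if dt.2 > (tops.headD (0, 0)).2 then [dt]
  else if dt.2 = (tops.headD (0, 0)).2 then tops ++ [dt]
  else tops

def find_top_right (dts : List (Int × Int)) : Int × Int :=
  let tops := dts.foldl pvStepA [(PySem.List.pyGet? dts 0).getD (0, 0)]
  tops.foldl (fun tr dt => if dt.1 > tr.1 then dt else tr) (tops.headD (0, 0))

-- ===== PORT B =====
-- one step of B's single loop: strict lexicographic (y, x) win updates best
def pvStepB (best : Int × Int) (dt : Int × Int) : Int × Int :=
  if dt.2 > best.2 ∨ (dt.2 = best.2 ∧ dt.1 > best.1) then dt else best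

def find_top_right_alt (dts : List (Int × Int)) : Int × Int :=
  dts.foldl pvStepB ((PySem.List.pyGet? dts 0).getD (0, 0))

-- ===== PRECONDITION & SPEC =====
-- Pre_ excludes only the empty list, on which both A and B raise IndexError at dts[0].
def Pre_find_top_right (dts : List (Int × Int)) : Prop := dts ≠ []
instance (dts : List (Int × Int)) : Decidable (Pre_find_top_right dts) := by unfold Pre_find_top_right; infer_instance
def pvWitness_find_top_right : (List (Int × Int)) := [(1, 2), (3, 2), (0, 5)]

def Spec_find_top_right (dts : List (Int × Int)) (out : Int × Int) : Prop := out = find_top_right_alt dts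
instance (dts : List (Int × Int)) (out : Int × Int) : Decidable (Spec_find_top_right dts out) := by unfold Spec_find_top_right; infer_instance

-- ===== CLAIM (what is proved, stated in full; the proofs are below) =====
def Claim_equal_find_top_right : Prop := ∀ (dts : List (Int × Int)), Dom_find_top_right dts → Pre_find_top_right dts → Spec_find_top_right dts (find_top_right dts)

-- ===== LEMMAS AND PROOFS =====

-- A's second scan, as a function of a `tops` state
def pvSel (tops : List (Int × Int)) : Int × Int :=
  tops.foldl (fun tr dt => if dt.1 > tr.1 then dt else tr) (tops.headD (0, 0))

theorem pvSel_append (l : List (Int × Int)) (dt : Int × Int) (h : l ≠ []) :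
    pvSel (l ++ [dt]) = (if dt.1 > (pvSel l).1 then dt else pvSel l) := by
  cases l with
  | nil => exact absurd rfl h
  | cons x xs => simp [pvSel, List.foldl_append]

theorem pvLoop_inv (rest tops : List (Int × Int)) (best : Int × Int)
    (hne : tops ≠ []) (hy : (tops.headD (0, 0)).2 = best.2) (hsel : pvSel tops = best) :
    pvSel (rest.foldl pvStepA tops) = rest.foldl pvStepB best := by
  induction rest generalizing tops best with
  | nil => simpa [pvSel] using hsel
  | cons dt rest ih =>
    simp only [List.foldl_cons]
    by_cases h1 : dt.2 > (tops.headD (0, 0)).2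
    · have hA : pvStepA tops dt = [dt] := by unfold pvStepA; rw [if_pos h1]
      have hB : pvStepB best dt = dt := by unfold pvStepB; rw [if_pos (Or.inl (hy ▸ h1))]
      rw [hA, hB]
      exact ih [dt] dt (by simp) (by simp) (by simp [pvSel])
    · by_cases h2 : dt.2 = (tops.headD (0, 0)).2
      · have heq : dt.2 = best.2 := h2.trans hy
        have hA : pvStepA tops dt = tops ++ [dt] := by
          unfold pvStepA; rw [if_neg h1, if_pos h2]
        have hB : pvStepB best dt = (if dt.1 > best.1 then dt else best) := by
          unfold pvStepB
          by_cases h3 : dt.1 > best.1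
          · rw [if_pos (Or.inr ⟨heq, h3⟩), if_pos h3]
          · have hc : ¬ (dt.2 > best.2 ∨ (dt.2 = best.2 ∧ dt.1 > best.1)) := by
              rintro (hg | ⟨_, hx⟩)
              · omega
              · exact h3 hx
            rw [if_neg hc, if_neg h3]
        rw [hA, hB]
        refine ih (tops ++ [dt]) _ (by simp) ?_ ?_
        · cases tops with
          | nil => exact absurd rfl hne
          | cons x xs =>
            simp only [List.cons_append, List.headD_cons] at hy ⊢
            by_cases h3 : dt.1 > best.1
            · rw [if_pos h3, hy, ← heq]
            · rw [if_neg h3]; exact hy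
        · rw [pvSel_append tops dt hne, hsel]
      · have hA : pvStepA tops dt = tops := by
          unfold pvStepA; rw [if_neg h1, if_neg h2]
        have hB : pvStepB best dt = best := by
          have hc : ¬ (dt.2 > best.2 ∨ (dt.2 = best.2 ∧ dt.1 > best.1)) := by
            rw [← hy]; rintro (hg | ⟨he, _⟩)
            · exact h1 hg
            · exact h2 he
          unfold pvStepB; rw [if_neg hc]
        rw [hA, hB]; exact ih tops best hne hy hsel

-- ===== VERDICT (by name: the statement is the Claim_ definition above) =====
theorem find_top_right_spec : Claim_equal_find_top_right := by
  intro dts _ hpre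
  cases dts with
  | nil => exact absurd rfl hpre
  | cons x xs =>
    show find_top_right (x :: xs) = find_top_right_alt (x :: xs)
    have hget : (PySem.List.pyGet? (x :: xs) 0).getD (0, 0) = x := by
      simp [PySem.List.pyGet?, PySem.List.pyIdx?]
    unfold find_top_right find_top_right_alt
    rw [hget]
    exact pvLoop_inv (x :: xs) [x] x (by simp) (by simp) (by simp [pvSel])
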